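-- pv_equiv track=rewrite | github.com/posl/comment_recommendation | script/mod_gen/5_time/zh/111_C/2.py | solve
-- ===== SOURCE A (Python) =====
-- def solve(n, v):
--     even = v[0::2]
--     odd = v[1::2]
--     even_count = 0
--     odd_count = 0
--     even_max = 0
--     odd_max = 0
--     for i in range(1, 10**5+1):
--         if even.count(i) > even_count:
--             even_count = even.count(i)
--             even_max = i
--         if odd.count(i) > odd_count:
--             odd_count = odd.count(i)
--             odd_max = i
--     if even_max != odd_max:
--         return n - even_count - odd_count
--     else:
--         even_count2 = 0
--         odd_count2 = 0
--         even_max2 = 0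
--         odd_max2 = 0
--         for i in range(1, 10**5+1):
--             if even.count(i) > even_count2 and i != even_max:
--                 even_count2 = even.count(i)
--                 even_max2 = i
--             if odd.count(i) > odd_count2 and i != odd_max:
--                 odd_count2 = odd.count(i)
--                 odd_max2 = i
--         if even_count2 > odd_count2:
--             return n - even_count - odd_count2
--         else:
--             return n - even_count2 - odd_count
-- ===== SOURCE B (Python) =====
-- def solve(n, v):
--     # Rank each parity's distinct values once by sorting (count desc, value asc):
--     # the first two entries of the ranking are the best and second-best directly,
--     # replacing A's two full scans of the range 1..10**5.
--     def top2(xs):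
--         cnt = {}
--         for x in xs:
--             if 1 <= x <= 10**5:
--                 cnt[x] = cnt.get(x, 0) + 1
--         ranked = sorted(cnt.items(), key=lambda kv: (-kv[1], kv[0]))
--         v1, c1 = ranked[0] if len(ranked) > 0 else (0, 0)
--         v2, c2 = ranked[1] if len(ranked) > 1 else (0, 0)
--         return c1, v1, c2, v2
--     ec, em, ec2, _ = top2(v[0::2])
--     oc, om, oc2, _ = top2(v[1::2])
--     if em != om:
--         return n - ec - oc
--     if ec2 > oc2:
--         return n - ec - oc2
--     return n - ec2 - oc
-- ===== Notes on version B (the rewrite author's own statement) =====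
-- stated objective: faster
-- what changed: A scans the candidate range 1..10**5 twice, calling list.count (a full list scan) on every candidate and re-scanning with a skip value for the second best; B counts each parity once into a dict and obtains best and second-best together as the first two entries of the items sorted by (count desc, value asc), with no candidate scan and no skip re-scan.
import Mathlib
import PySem

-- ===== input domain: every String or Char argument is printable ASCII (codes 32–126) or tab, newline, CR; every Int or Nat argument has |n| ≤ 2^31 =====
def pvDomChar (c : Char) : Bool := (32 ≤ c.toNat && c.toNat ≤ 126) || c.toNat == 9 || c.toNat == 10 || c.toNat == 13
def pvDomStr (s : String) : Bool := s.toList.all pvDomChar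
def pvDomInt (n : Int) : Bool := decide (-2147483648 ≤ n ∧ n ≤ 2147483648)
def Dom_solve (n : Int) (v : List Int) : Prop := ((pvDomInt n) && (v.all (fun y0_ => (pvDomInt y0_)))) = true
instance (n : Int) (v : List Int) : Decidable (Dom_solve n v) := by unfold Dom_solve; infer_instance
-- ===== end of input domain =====

-- B replaces A's two scans of the range 1..10**5 (with a list.count inside, and a second
-- skip-rescan for the runner-up) by one frequency dict per parity whose items are sorted
-- once by (count desc, value asc): the best and second-best are the first two entries.

-- ===== PORT A =====
def solve (n : Int) (v : List Int) : Int :=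
  let even := (PySem.List.slice? v (some 0) none 2).getD []
  let odd := (PySem.List.slice? v (some 1) none 2).getD []
  let r := (PySem.List.pyRange 1 100001).foldl
    (fun (s : (Int × Int) × (Int × Int)) i =>
      (if (PySem.List.count even i : Int) > s.1.1 then ((PySem.List.count even i : Int), i) else s.1,
       if (PySem.List.count odd i : Int) > s.2.1 then ((PySem.List.count odd i : Int), i) else s.2))
    ((0, 0), (0, 0))
  if r.1.2 ≠ r.2.2 then n - r.1.1 - r.2.1
  else
    let r2 := (PySem.List.pyRange 1 100001).foldl
      (fun (s : (Int × Int) × (Int × Int)) i =>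
        (if (PySem.List.count even i : Int) > s.1.1 ∧ i ≠ r.1.2 then ((PySem.List.count even i : Int), i) else s.1,
         if (PySem.List.count odd i : Int) > s.2.1 ∧ i ≠ r.2.2 then ((PySem.List.count odd i : Int), i) else s.2))
      ((0, 0), (0, 0))
    if r2.1.1 > r2.2.1 then n - r.1.1 - r2.2.1 else n - r2.1.1 - r.2.1

-- ===== PORT B =====
-- top2(xs): count xs into a dict, sort the items by (-count, value), read off the
-- first two (value, count) pairs (padding with (0, 0)); returns (c1, v1, c2, v2).
def bTop2 (xs : List Int) : Int × Int × Int × Int :=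
  let cnt := xs.foldl (fun d x => if 1 ≤ x ∧ x ≤ 100000 then d.insert x (d.getD x 0 + 1) else d) (PySem.Dict.empty : PySem.Dict Int Int)
  let ranked := PySem.List.sorted2 cnt.items (fun kv => -kv.2) (fun kv => kv.1) false
  let p1 := match ranked with | kv :: _ => kv | [] => (0, 0)
  let p2 := match ranked with | _ :: kv :: _ => kv | _ => (0, 0)
  (p1.2, p1.1, p2.2, p2.1)

def solve_alt (n : Int) (v : List Int) : Int :=
  let e := bTop2 ((PySem.List.slice? v (some 0) none 2).getD [])
  let o := bTop2 ((PySem.List.slice? v (some 1) none 2).getD [])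
  if e.2.1 ≠ o.2.1 then n - e.1 - o.1
  else if e.2.2.1 > o.2.2.1 then n - e.1 - o.2.2.1
  else n - e.2.2.1 - o.1

-- ===== PRECONDITION & SPEC =====
def Spec_solve (n : Int) (v : List Int) (out : Int) : Prop := out = solve_alt n v
instance (n : Int) (v : List Int) (out : Int) : Decidable (Spec_solve n v out) := by unfold Spec_solve; infer_instance

-- ===== CLAIM (what is proved, stated in full; the proofs are below) =====
def Claim_equal_solve : Prop := ∀ (n : Int) (v : List Int), Dom_solve n v → Spec_solve n v (solve n v)

-- ===== LEMMAS AND PROOFS =====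

-- A's single loop over range(1, 10**5+1), for one parity, with a skipped value (skip = 0 means no skip).
def aBest (xs : List Int) (skip : Int) : Int × Int :=
  (PySem.List.pyRange 1 100001).foldl
    (fun (s : Int × Int) i =>
      if (PySem.List.count xs i : Int) > s.1 ∧ i ≠ skip then ((PySem.List.count xs i : Int), i) else s)
    (0, 0)

-- proof-side: the frequency dict bTop2 builds
def bCounts (xs : List Int) : PySem.Dict Int Int :=
  xs.foldl (fun d x => if 1 ≤ x ∧ x ≤ 100000 then d.insert x (d.getD x 0 + 1) else d) PySem.Dict.empty

-- proof-side: the best (count, value) over the sorted distinct keys, skipping one value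
def bBest (cnt : PySem.Dict Int Int) (skip : Int) : Int × Int :=
  (PySem.List.sorted (PySem.Dict.keys cnt) (fun x => x) false).foldl
    (fun (s : Int × Int) val => if val ≠ skip ∧ cnt.getD val 0 > s.1 then (cnt.getD val 0, val) else s)
    (0, 0)

-- Folding over a list equals folding over its filtered version when, under an invariant P
-- preserved by the step, the step is the identity on dropped elements.
lemma foldl_filter_of_inv {α σ : Type} (l : List α) (step : σ → α → σ) (q : α → Bool)
    (P : σ → Prop) (hpres : ∀ s x, P s → P (step s x))
    (hid : ∀ s x, x ∈ l → P s → q x = false → step s x = s)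
    (init : σ) (hinit : P init) :
    l.foldl step init = (l.filter q).foldl step init := by
  induction l generalizing init with
  | nil => rfl
  | cons a t ih =>
    by_cases hq : q a = true
    · rw [List.filter_cons_of_pos hq]
      exact ih (fun s x hx => hid s x (List.mem_cons_of_mem _ hx)) (step init a) (hpres init a hinit)
    · rw [List.filter_cons_of_neg (by simpa using hq), List.foldl_cons,
          hid init a List.mem_cons_self hinit (by simpa using hq)]
      exact ih (fun s x hx => hid s x (List.mem_cons_of_mem _ hx)) init hinit

lemma bCounts_eq (xs : List Int) :
    bCounts xs = PySem.Dict.counter (xs.filter (fun x => decide (1 ≤ x ∧ x ≤ 100000))) := by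
  unfold bCounts
  rw [PySem.List.foldl_ite_eq_foldl_filter (p := fun x : Int => 1 ≤ x ∧ x ≤ 100000)
        (f := fun (d : PySem.Dict Int Int) x => d.insert x (d.getD x 0 + 1)),
      PySem.Dict.foldl_insert_getD_add_one_eq_counter]

-- A's first loop has no skip condition; over range(1, 10**5+1) it equals aBest with skip 0.
lemma first_loop_eq (xs : List Int) :
    (PySem.List.pyRange 1 100001).foldl
      (fun (s : Int × Int) i =>
        if (PySem.List.count xs i : Int) > s.1 then ((PySem.List.count xs i : Int), i) else s)
      (0, 0) = aBest xs 0 := by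
  unfold aBest
  apply PySem.List.foldl_congr_mem
  intro acc x hx
  have h1 : (1 : Int) ≤ x := (PySem.List.mem_pyRange_one.mp hx).1
  have hne : x ≠ 0 := by omega
  by_cases hc : (PySem.List.count xs x : Int) > acc.1 <;> simp [hne]

-- A's range scan equals the scan over the sorted counter keys.
lemma aBest_eq_bBest (xs : List Int) (skip : Int) :
    aBest xs skip = bBest (bCounts xs) skip := by
  set fxs := xs.filter (fun x => decide (1 ≤ x ∧ x ≤ 100000)) with hfxs
  have hmemf : ∀ i, i ∈ fxs → (1 ≤ i ∧ i ≤ 100000) ∧ i ∈ xs := by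
    intro i hi
    rw [hfxs, List.mem_filter] at hi
    exact ⟨by simpa using hi.2, hi.1⟩
  have hcnt : ∀ i, i ∈ fxs → List.count i fxs = List.count i xs := by
    intro i hi
    exact List.count_filter (by simpa using (hmemf i hi).1)
  have hzero : ∀ i : Int, 1 ≤ i → i ≤ 100000 → i ∉ fxs → List.count i xs = 0 := by
    intro i h1 h2 hni
    rw [List.count_eq_zero]
    intro hmem
    exact hni (by rw [hfxs, List.mem_filter]; exact ⟨hmem, by simp [h1, h2]⟩)
  have hkeys : PySem.List.sorted (PySem.Dict.keys (bCounts xs)) (fun x => x) false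
      = (PySem.List.pyRange 1 100001).filter (fun i => decide (i ∈ fxs)) := by
    rw [bCounts_eq, PySem.Dict.keys_counter, ← hfxs]
    apply PySem.List.sorted_eq_of_perm_of_pairwise_lt
    · rw [List.perm_ext_iff_of_nodup
            ((PySem.List.nodup_pyRange_one 1 100001).filter _) (PySem.Set.nodup_ofList _)]
      intro a
      rw [List.mem_filter, PySem.List.mem_pyRange_one, PySem.Set.mem_ofList]
      constructor
      · rintro ⟨_, ha⟩; simpa using ha
      · intro ha
        have hb := (hmemf a ha).1
        exact ⟨⟨hb.1, by omega⟩, by simpa using ha⟩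
    · exact (PySem.List.pairwise_lt_pyRange_one 1 100001).filter _
  unfold aBest bBest
  rw [hkeys]
  rw [foldl_filter_of_inv (PySem.List.pyRange 1 100001)
        (fun (s : Int × Int) i =>
          if (PySem.List.count xs i : Int) > s.1 ∧ i ≠ skip then ((PySem.List.count xs i : Int), i) else s)
        (fun i => decide (i ∈ fxs)) (fun s => 0 ≤ s.1)
        (by intro s x hP; dsimp only; split_ifs with h
            · exact Int.natCast_nonneg _
            · exact hP)
        (by intro s x hxmem hP hq
            have hnf : x ∉ fxs := by simpa using hq
            have hr := PySem.List.mem_pyRange_one.mp hxmem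
            have hc0 : List.count x xs = 0 := hzero x hr.1 (by omega) hnf
            dsimp only
            rw [if_neg]
            rintro ⟨hgt, -⟩
            rw [PySem.List.count_eq, hc0] at hgt
            omega)
        (0, 0) (by norm_num)]
  apply PySem.List.foldl_congr_mem
  intro acc x hx
  have hxf : x ∈ fxs := by simpa using (List.mem_filter.mp hx).2
  have hc : (bCounts xs).getD x 0 = ((PySem.List.count xs x : Nat) : Int) := by
    rw [bCounts_eq, ← hfxs, PySem.Dict.getD_counter, hcnt x hxf, PySem.List.count_eq]
  rw [hc]
  by_cases h2 : x = skip <;> simp [h2]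

-- Source B's tuple-key sort is the sort by the lexicographic key
lemma sorted2_eq_sorted_lex (xs : List (Int × Int)) :
    PySem.List.sorted2 xs (fun kv => -kv.2) (fun kv => kv.1) false
      = PySem.List.sorted xs (fun kv => toLex (-kv.2, kv.1)) false := by
  rw [PySem.List.sorted_eq_foldl_insertBy]
  show xs.foldl (fun acc x => PySem.List.insertBy _ x acc) [] = _
  congr 1
  funext acc x
  congr 1
  funext a b
  simp only [Prod.Lex.lt_iff]
  rcases lt_trichotomy (-a.2 : Int) (-b.2) with h | h | h <;>
    rcases lt_trichotomy (a.1 : Int) (b.1) with h2 | h2 | h2 <;>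
      simp [h, h2] <;> omega

-- the best-fold over a strictly increasing list of positive-count values is the lex min
lemma foldBest_min (f : Int → Int) (L : List Int)
    (hpos : ∀ k ∈ L, 1 ≤ f k) (hsort : L.Pairwise (· < ·)) :
    (L = [] ∧ L.foldl (fun (s : Int × Int) k => if f k > s.1 then (f k, k) else s) (0, 0) = (0, 0)) ∨
    (∃ r : Int × Int,
      L.foldl (fun (s : Int × Int) k => if f k > s.1 then (f k, k) else s) (0, 0) = r ∧
      r.2 ∈ L ∧ r.1 = f r.2 ∧
      ∀ k ∈ L, k ≠ r.2 → toLex ((-r.1 : Int), r.2) < toLex (-(f k), k)) := by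
  induction L using List.reverseRecOn with
  | nil => left; exact ⟨rfl, rfl⟩
  | append_singleton L v ih =>
    have hposL : ∀ k ∈ L, 1 ≤ f k := fun k hk => hpos k (List.mem_append_left _ hk)
    have hsortL : L.Pairwise (· < ·) := (List.pairwise_append.mp hsort).1
    have hlt : ∀ k ∈ L, k < v := by
      intro k hk
      exact (List.pairwise_append.mp hsort).2.2 k hk v (List.mem_singleton_self v)
    have hv1 : 1 ≤ f v := hpos v (List.mem_append_right _ (List.mem_singleton_self v))
    rw [List.foldl_append]
    rcases ih hposL hsortL with ⟨hnil, hfold⟩ | ⟨r, hfold, hmem, hval, hmin⟩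
    · subst hnil
      right
      refine ⟨(f v, v), ?_, by simp, rfl, by simp⟩
      simp only [List.foldl_nil, List.foldl_cons]
      rw [if_pos (by omega)]
    · rw [hfold]
      simp only [List.foldl_cons, List.foldl_nil]
      by_cases hgt : f v > r.1
      · right
        rw [if_pos hgt]
        refine ⟨(f v, v), rfl, List.mem_append_right _ (List.mem_singleton_self v), rfl, ?_⟩
        intro k hk hkne
        rcases List.mem_append.mp hk with hk | hk
        · have hfk : f k ≤ r.1 := by
            by_cases hkr : k = r.2
            · subst hkr; omega
            · have := hmin k hk hkr
              simp only [Prod.Lex.lt_iff, ofLex_toLex] at this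
              omega
          simp only [Prod.Lex.lt_iff, ofLex_toLex]
          left
          omega
        · simp at hk; omega
      · right
        rw [if_neg hgt]
        refine ⟨r, rfl, List.mem_append_left _ hmem, hval, ?_⟩
        intro k hk hkne
        rcases List.mem_append.mp hk with hk | hk
        · exact hmin k hk hkne
        · simp only [List.mem_singleton] at hk
          subst hk
          simp only [Prod.Lex.lt_iff, ofLex_toLex]
          rcases lt_or_eq_of_le (not_lt.mp hgt) with h | h
          · left; omega
          · right; exact ⟨by omega, hlt r.2 hmem⟩

-- bTop2 reads off exactly (best, best-excluding-best) in bBest form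
lemma bTop2_eq (xs : List Int) :
    bTop2 xs = ((bBest (bCounts xs) 0).1, (bBest (bCounts xs) 0).2,
                (bBest (bCounts xs) (bBest (bCounts xs) 0).2).1,
                (bBest (bCounts xs) (bBest (bCounts xs) 0).2).2) := by
  set fxs := xs.filter (fun x => decide (1 ≤ x ∧ x ≤ 100000)) with hfxs
  set f : Int → Int := fun k => ((List.count k fxs : Nat) : Int) with hff
  set g : Int → Int × Int := fun k => (k, f k) with hg
  set S := PySem.Set.ofList fxs with hS
  have hitems : (bCounts xs).items = S.map g := by
    rw [bCounts_eq, ← hfxs, PySem.Dict.items_counter]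
  have hkeys : PySem.Dict.keys (bCounts xs) = S := by
    rw [bCounts_eq, ← hfxs, PySem.Dict.keys_counter]
  set K := PySem.List.sorted S (fun x => x) false with hK
  have hKpair : K.Pairwise (· < ·) := by
    rw [hK, hS]; exact PySem.List.sorted_ofList_pairwise_lt fxs
  have hKmem : ∀ k, k ∈ K ↔ k ∈ S := by
    intro k; rw [hK]; exact PySem.List.mem_sorted S (fun x => x) false k
  have hSpos : ∀ k ∈ S, 1 ≤ f k := by
    intro k hk
    have hm : k ∈ fxs := by rw [hS, PySem.Set.mem_ofList] at hk; exact hk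
    have := List.count_pos_iff.mpr hm
    simp only [hff]
    omega
  have hSrange : ∀ k ∈ S, 1 ≤ k := by
    intro k hk
    rw [hS, PySem.Set.mem_ofList, hfxs, List.mem_filter] at hk
    have := hk.2
    simp only [decide_eq_true_eq] at this
    omega
  have hgetD : ∀ k, (bCounts xs).getD k 0 = f k := by
    intro k
    rw [bCounts_eq, ← hfxs, PySem.Dict.getD_counter]
  -- bBest as a pure best-fold over the sorted keys without skip
  have hbBest : ∀ sk, bBest (bCounts xs) sk
      = (K.filter (fun k => decide (¬ k = sk))).foldl
          (fun (s : Int × Int) k => if f k > s.1 then (f k, k) else s) (0, 0) := by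
    intro sk
    unfold bBest
    rw [hkeys, ← hK]
    rw [foldl_filter_of_inv K
          (fun (s : Int × Int) val => if val ≠ sk ∧ (bCounts xs).getD val 0 > s.1 then ((bCounts xs).getD val 0, val) else s)
          (fun k => decide (¬ k = sk)) (fun _ => True) (fun _ _ _ => trivial)
          (by intro s x hx _ hq
              simp only [decide_eq_false_iff_not, not_not] at hq
              simp [hq])
          (0, 0) trivial]
    apply PySem.List.foldl_congr_mem
    intro acc k hk
    have hne : k ≠ sk := by
      have := (List.mem_filter.mp hk).2; simpa using this
    rw [hgetD]
    simp [hne]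
  -- the characterization of each best-fold
  have hLfacts : ∀ sk : Int,
      (∀ k ∈ K.filter (fun k => decide (¬ k = sk)), 1 ≤ f k) ∧
      (K.filter (fun k => decide (¬ k = sk))).Pairwise (· < ·) ∧
      (∀ k, k ∈ K.filter (fun k => decide (¬ k = sk)) ↔ k ∈ S ∧ k ≠ sk) := by
    intro sk
    refine ⟨?_, hKpair.filter _, ?_⟩
    · intro k hk
      exact hSpos k ((hKmem k).mp (List.mem_filter.mp hk).1)
    · intro k
      rw [List.mem_filter, hKmem]
      simp
  -- the ranked list
  have hnodupS : S.Nodup := by rw [hS]; exact PySem.Set.nodup_ofList fxs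
  have hnodupItems : (S.map g).Nodup := by
    refine hnodupS.map ?_
    intro a b hab
    have := congrArg Prod.fst hab
    simpa [hg] using this
  set R := PySem.List.sorted ((bCounts xs).items) (fun kv => toLex ((-kv.2 : Int), kv.1)) false with hR
  have hRperm : R.Perm (S.map g) := by rw [hR, hitems]; exact PySem.List.sorted_perm _ _ _
  have hRpair : R.Pairwise (fun a b => toLex ((-a.2 : Int), a.1) ≤ toLex ((-b.2 : Int), b.1)) := by
    rw [hR]; exact PySem.List.sorted_pairwise _ _
  have hRmem : ∀ p, p ∈ R ↔ p ∈ S.map g := by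
    intro p; rw [hR, hitems]; exact PySem.List.mem_sorted (S.map g) (fun kv => toLex ((-kv.2 : Int), kv.1)) false p
  have hRnodup : R.Nodup := hRperm.nodup_iff.mpr hnodupItems
  have hbTop : bTop2 xs =
      ((match R with | kv :: _ => kv | [] => ((0 : Int), (0 : Int))).2,
       (match R with | kv :: _ => kv | [] => ((0 : Int), (0 : Int))).1,
       (match R with | _ :: kv :: _ => kv | _ => ((0 : Int), (0 : Int))).2,
       (match R with | _ :: kv :: _ => kv | _ => ((0 : Int), (0 : Int))).1) := by
    show ((match PySem.List.sorted2 (bCounts xs).items (fun kv => -kv.2) (fun kv => kv.1) false with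
            | kv :: _ => kv | [] => ((0 : Int), (0 : Int))).2,
          (match PySem.List.sorted2 (bCounts xs).items (fun kv => -kv.2) (fun kv => kv.1) false with
            | kv :: _ => kv | [] => ((0 : Int), (0 : Int))).1,
          (match PySem.List.sorted2 (bCounts xs).items (fun kv => -kv.2) (fun kv => kv.1) false with
            | _ :: kv :: _ => kv | _ => ((0 : Int), (0 : Int))).2,
          (match PySem.List.sorted2 (bCounts xs).items (fun kv => -kv.2) (fun kv => kv.1) false with
            | _ :: kv :: _ => kv | _ => ((0 : Int), (0 : Int))).1) = _
    rw [sorted2_eq_sorted_lex, ← hR]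
  rw [hbTop]
  -- case on R
  cases hRc : R with
  | nil =>
    have hitemsnil : S.map g = [] := by
      rw [hR] at hRc
      rw [← hitems, ← (PySem.List.sorted_eq_nil_iff ((bCounts xs).items) (fun kv => toLex ((-kv.2 : Int), kv.1)) false), hRc]
    have hKnil : K = [] := by
      rcases List.map_eq_nil_iff.mp hitemsnil with hSnil
      rw [hK, hSnil, PySem.List.sorted_eq_nil_iff]
    have hb : ∀ sk, bBest (bCounts xs) sk = (0, 0) := by
      intro sk; rw [hbBest sk, hKnil]; rfl
    simp [hb]
  | cons m t =>
    -- first best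
    rcases foldBest_min f _ (hLfacts 0).1 (hLfacts 0).2.1 with ⟨hnil, _⟩ | ⟨r, hfold, hrmem, hrval, hrmin⟩
    · exfalso
      have hm : m ∈ S.map g := (hRmem m).mp (by rw [hRc]; exact List.mem_cons_self)
      rcases List.mem_map.mp hm with ⟨k₀, hk₀S, hk₀⟩
      have : k₀ ∈ K.filter (fun k => decide (¬ k = (0 : Int))) := by
        rw [((hLfacts 0).2.2 k₀)]
        exact ⟨hk₀S, by have := hSrange k₀ hk₀S; omega⟩
      rw [hnil] at this
      exact absurd this (List.not_mem_nil)
    · have hb1 : bBest (bCounts xs) 0 = r := by rw [hbBest 0, hfold]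
      have hrS : r.2 ∈ S := ((hLfacts 0).2.2 r.2).mp hrmem |>.1
      -- m = g r.2
      have hm : m ∈ S.map g := (hRmem m).mp (by rw [hRc]; exact List.mem_cons_self)
      rcases List.mem_map.mp hm with ⟨k₀, hk₀S, hk₀⟩
      have hhead : ∀ y ∈ S.map g, toLex ((-m.2 : Int), m.1) ≤ toLex ((-y.2 : Int), y.1) := by
        intro y hy
        refine PySem.List.key_head_sorted_le (m := m) (t := t) ((bCounts xs).items) (fun kv => toLex ((-kv.2 : Int), kv.1)) ?_ y (by rw [hitems]; exact hy)
        rw [← hR, hRc]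
      have hmr : m = g r.2 := by
        by_cases hk : k₀ = r.2
        · rw [← hk₀, hk]
        · exfalso
          have h1 := hrmin k₀ (((hLfacts 0).2.2 k₀).mpr ⟨hk₀S, by have := hSrange k₀ hk₀S; omega⟩) hk
          have h2 := hhead (g r.2) (List.mem_map.mpr ⟨r.2, hrS, rfl⟩)
          rw [← hk₀] at h2
          simp only [hg] at h2 h1
          rw [hrval] at h1
          exact absurd (lt_of_lt_of_le h1 h2) (lt_irrefl _)
      -- second best, skipping r.2
      rcases foldBest_min f _ (hLfacts r.2).1 (hLfacts r.2).2.1 with ⟨hnil2, hfold2⟩ | ⟨r', hfold2, hrmem2, hrval2, hrmin2⟩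
      · -- no second distinct value: t must be []
        have hb2 : bBest (bCounts xs) r.2 = (0, 0) := by rw [hbBest r.2, hfold2]
        cases ht : t with
        | nil => rw [hb1, hb2, hmr]; simp [hg, hrval]
        | cons kv₂ t' =>
          exfalso
          have hkv : kv₂ ∈ S.map g := (hRmem kv₂).mp (by rw [hRc, ht]; simp)
          rcases List.mem_map.mp hkv with ⟨k₁, hk₁S, hk₁⟩
          have hne : k₁ ≠ r.2 := by
            intro h
            have : kv₂ = m := by rw [← hk₁, h, ← hmr]
            have : R.Nodup := hRnodup
            rw [hRc, ht] at this
            simp at this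
            exact this.1.1 (by rw [← ‹kv₂ = m›])
          have : k₁ ∈ K.filter (fun k => decide (¬ k = r.2)) :=
            ((hLfacts r.2).2.2 k₁).mpr ⟨hk₁S, hne⟩
          rw [hnil2] at this
          exact absurd this (List.not_mem_nil)
      · have hb2 : bBest (bCounts xs) r.2 = r' := by rw [hbBest r.2, hfold2]
        have hr'S : r'.2 ∈ S ∧ r'.2 ≠ r.2 := ((hLfacts r.2).2.2 r'.2).mp hrmem2
        cases ht : t with
        | nil =>
          exfalso
          -- items = [m] but g r'.2 is a second distinct item
          have hR1 : R = [m] := by rw [hRc, ht]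
          have hsingle : S.map g = [m] := List.Perm.eq_singleton (hR1 ▸ hRperm.symm)
          have h2 : g r'.2 ∈ S.map g := List.mem_map.mpr ⟨r'.2, hr'S.1, rfl⟩
          rw [hsingle] at h2
          have hgm : g r'.2 = m := by simpa using h2
          rw [hmr] at hgm
          exact hr'S.2 (by have := congrArg Prod.fst hgm; simpa [hg] using this)
        | cons kv₂ t' =>
          have hkv : kv₂ ∈ S.map g := (hRmem kv₂).mp (by rw [hRc, ht]; simp)
          rcases List.mem_map.mp hkv with ⟨k₁, hk₁S, hk₁⟩
          have hne : k₁ ≠ r.2 := by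
            intro h
            have hkm : kv₂ = m := by rw [← hk₁, h, ← hmr]
            have hnd : R.Nodup := hRnodup
            rw [hRc, ht] at hnd
            simp at hnd
            exact hnd.1.1 hkm.symm
          have hkvr : kv₂ = g r'.2 := by
            by_cases hk : k₁ = r'.2
            · rw [← hk₁, hk]
            · exfalso
              have h1 := hrmin2 k₁ (((hLfacts r.2).2.2 k₁).mpr ⟨hk₁S, hne⟩) hk
              -- kv₂ is minimal among t, and g r'.2 ∈ t
              have hgr : g r'.2 ∈ R := (hRmem _).mpr (List.mem_map.mpr ⟨r'.2, hr'S.1, rfl⟩)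
              have hgm : g r'.2 ≠ m := by
                rw [hmr]
                intro h
                exact hr'S.2 (by have := congrArg Prod.fst h; simpa [hg] using this)
              have hgt : g r'.2 ∈ kv₂ :: t' := by
                rw [hRc, ht] at hgr
                rcases List.mem_cons.mp hgr with h | h
                · exact absurd h hgm
                · exact h
              have h2 : toLex ((-kv₂.2 : Int), kv₂.1) ≤ toLex ((-(g r'.2).2 : Int), (g r'.2).1) := by
                rcases List.mem_cons.mp hgt with h | h
                · rw [h]
                · have hp := hRpair
                  rw [hRc, ht] at hp
                  exact (List.pairwise_cons.mp hp).2 |> List.pairwise_cons.mp |>.1 _ h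
              rw [← hk₁] at h2
              simp only [hg] at h1 h2
              rw [hrval2] at h1
              exact absurd (lt_of_lt_of_le h1 h2) (lt_irrefl _)
          rw [hb1, hb2, hmr, hkvr]
          simp [hg, hrval, hrval2]

-- ===== VERDICT (by name: the statement is the Claim_ definition above) =====
theorem solve_spec : Claim_equal_solve := by
  intro n v _
  unfold Spec_solve
  simp only [solve, solve_alt]
  generalize (PySem.List.slice? v (some 0) none 2).getD [] = E
  generalize (PySem.List.slice? v (some 1) none 2).getD [] = O
  rw [PySem.List.foldl_prod_mk
        (f := fun (s : Int × Int) i =>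
          if (PySem.List.count E i : Int) > s.1 then ((PySem.List.count E i : Int), i) else s)
        (g := fun (s : Int × Int) i =>
          if (PySem.List.count O i : Int) > s.1 then ((PySem.List.count O i : Int), i) else s)]
  rw [first_loop_eq E, first_loop_eq O]
  dsimp only
  rw [PySem.List.foldl_prod_mk
        (f := fun (s : Int × Int) i =>
          if (PySem.List.count E i : Int) > s.1 ∧ i ≠ (aBest E 0).2 then ((PySem.List.count E i : Int), i) else s)
        (g := fun (s : Int × Int) i =>
          if (PySem.List.count O i : Int) > s.1 ∧ i ≠ (aBest O 0).2 then ((PySem.List.count O i : Int), i) else s)]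
  have h2E : List.foldl
      (fun (s : Int × Int) i =>
        if (PySem.List.count E i : Int) > s.1 ∧ i ≠ (aBest E 0).2 then ((PySem.List.count E i : Int), i) else s)
      (0, 0) (PySem.List.pyRange 1 100001) = aBest E ((aBest E 0).2) := rfl
  have h2O : List.foldl
      (fun (s : Int × Int) i =>
        if (PySem.List.count O i : Int) > s.1 ∧ i ≠ (aBest O 0).2 then ((PySem.List.count O i : Int), i) else s)
      (0, 0) (PySem.List.pyRange 1 100001) = aBest O ((aBest O 0).2) := rfl
  rw [h2E, h2O, bTop2_eq E, bTop2_eq O, aBest_eq_bBest E, aBest_eq_bBest O,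
      aBest_eq_bBest E ((bBest (bCounts E) 0).2), aBest_eq_bBest O ((bBest (bCounts O) 0).2)]
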